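-- pv_equiv track=rewrite | github.com/stormhurricane/advent_of_code | 2015/day_5/main.py | part_two
-- ===== SOURCE A (Python) =====
-- def part_two(input):
--     nice_string_count = 0
--     for line in input:
--         rule_of_xyx = False
--         rule_of_pair = False
--         for i, char in enumerate(line):
--             if i+2 < len(line) and not rule_of_xyx:
--                 if char == line[i+2]:
--                     rule_of_xyx = True
--             if not rule_of_pair:
--                 j = i + 2
--                 while (j + 1 < len(line)):
--                     if f"{char}{line[i+1]}" == f"{line[j:j+2]}":
--                         rule_of_pair = True
--                     j += 1
--
--             if rule_of_pair and rule_of_xyx: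
--                 break
--
--         if rule_of_pair and rule_of_xyx:
--             nice_string_count += 1
--
--     return nice_string_count
-- ===== SOURCE B (Python) =====
-- def part_two(input):
--     count = 0
--     for line in input:
--         first = {}
--         xyx = False
--         pair = False
--         n = len(line)
--         for i in range(n - 1):
--             p = (line[i], line[i + 1])
--             if p in first:
--                 if i - first[p] >= 2:
--                     pair = True
--             else:
--                 first[p] = i
--             if i + 2 < n and line[i] == line[i + 2]:
--                 xyx = True
--         if xyx and pair:
--             count += 1
--     return count
-- ===== Notes on version B (the rewrite author's own statement) =====
-- stated objective: alternative
-- what changed: A rescans the rest of the line once per character to find a repeated non-overlapping pair (quadratic per line); B makes a single pass recording the first index of each adjacent pair in a dict and checks the gap to that first index (intended as faster; measured only 1.29x on a timing run's input family).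
import Mathlib
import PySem

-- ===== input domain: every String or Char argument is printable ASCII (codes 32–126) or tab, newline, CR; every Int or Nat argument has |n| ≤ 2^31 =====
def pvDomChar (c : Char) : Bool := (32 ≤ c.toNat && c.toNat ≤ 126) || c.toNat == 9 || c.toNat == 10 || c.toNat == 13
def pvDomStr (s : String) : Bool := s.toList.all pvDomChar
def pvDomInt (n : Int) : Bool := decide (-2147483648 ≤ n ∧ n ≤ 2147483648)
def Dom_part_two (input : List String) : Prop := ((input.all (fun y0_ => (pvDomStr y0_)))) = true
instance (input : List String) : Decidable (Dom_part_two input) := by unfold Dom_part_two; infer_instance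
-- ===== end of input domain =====

-- B replaces A's per-character rescan of the rest of the line (looking for a repeated pair)
-- by a single pass that records the first index of each adjacent pair in a dict (alternative algorithm).

-- ===== PORT A =====
-- the inner `while (j + 1 < len(line))` of A; all indices are guarded in range, so List.getD is exact
def aPairWhile (l : List Char) (i j : Nat) (pr : Bool) : Bool :=
  if j + 1 < l.length then
    aPairWhile l i (j + 1)
      (if (l.getD i ' ', l.getD (i + 1) ' ') = (l.getD j ' ', l.getD (j + 1) ' ') then true else pr)
  else pr
termination_by l.length - j

-- the `for i, char in enumerate(line)` loop of A, with its early `break`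
def aLineLoop (l : List Char) (i : Nat) (xyx pr : Bool) : Bool :=
  if i < l.length then
    let xyx' := if i + 2 < l.length ∧ xyx = false then
                  (if l.getD i ' ' = l.getD (i + 2) ' ' then true else xyx)
                else xyx
    let pr' := if pr = false then aPairWhile l i (i + 2) pr else pr
    if pr' && xyx' then true else aLineLoop l (i + 1) xyx' pr'
  else pr && xyx
termination_by l.length - i

def part_two (input : List String) : Int :=
  input.foldl (fun acc line => if aLineLoop line.toList 0 false false then acc + 1 else acc) 0

-- ===== PORT B =====
-- the `for i in range(n - 1)` loop of B: `first` records the first index of each adjacent pair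
def bLineLoop (l : List Char) (i : Nat) (first : PySem.Dict (Char × Char) Nat)
    (xyx pr : Bool) : Bool :=
  if i < l.length - 1 then
    match first.get? (l.getD i ' ', l.getD (i + 1) ' ') with
    | some k =>
        bLineLoop l (i + 1) first
          (xyx || (decide (i + 2 < l.length) && (l.getD i ' ' == l.getD (i + 2) ' ')))
          (pr || decide (i - k ≥ 2))
    | none =>
        bLineLoop l (i + 1) (first.insert (l.getD i ' ', l.getD (i + 1) ' ') i)
          (xyx || (decide (i + 2 < l.length) && (l.getD i ' ' == l.getD (i + 2) ' ')))
          pr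
  else xyx && pr
termination_by l.length - 1 - i

def part_two_alt (input : List String) : Int :=
  input.foldl (fun acc line => if bLineLoop line.toList 0 PySem.Dict.empty false false then acc + 1 else acc) 0

-- ===== PRECONDITION & SPEC =====
def Spec_part_two (input : List String) (out : Int) : Prop := out = part_two_alt input
instance (input : List String) (out : Int) : Decidable (Spec_part_two input out) := by unfold Spec_part_two; infer_instance

-- ===== CLAIM (what is proved, stated in full; the proofs are below) =====
def Claim_equal_part_two : Prop := ∀ (input : List String), Dom_part_two input → Spec_part_two input (part_two input)

-- ===== LEMMAS AND PROOFS =====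

-- the adjacent pair at index k
def pairAt (l : List Char) (k : Nat) : Char × Char := (l.getD k ' ', l.getD (k + 1) ' ')

-- "some position k ≥ i has l[k] = l[k+2]" (xyx rule, restricted to positions ≥ i)
def XFrom (l : List Char) (i : Nat) : Prop :=
  ∃ k, i ≤ k ∧ k + 2 < l.length ∧ l.getD k ' ' = l.getD (k + 2) ' '

-- non-overlapping repeated pair whose FIRST occurrence is at index ≥ i (A discovers these)
def PFromA (l : List Char) (i : Nat) : Prop :=
  ∃ a b, i ≤ a ∧ a + 2 ≤ b ∧ b + 1 < l.length ∧ pairAt l a = pairAt l b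

-- non-overlapping repeated pair whose SECOND occurrence is at index ≥ i (B discovers these)
def PFromB (l : List Char) (i : Nat) : Prop :=
  ∃ a b, a + 2 ≤ b ∧ i ≤ b ∧ b + 1 < l.length ∧ pairAt l a = pairAt l b

lemma XFrom_succ (l : List Char) (i : Nat) :
    XFrom l i ↔ (i + 2 < l.length ∧ l.getD i ' ' = l.getD (i + 2) ' ') ∨ XFrom l (i + 1) := by
  constructor
  · rintro ⟨k, hik, hk, he⟩
    rcases Nat.eq_or_lt_of_le hik with rfl | h
    · exact Or.inl ⟨hk, he⟩
    · exact Or.inr ⟨k, h, hk, he⟩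
  · rintro (⟨hk, he⟩ | ⟨k, hik, hk, he⟩)
    · exact ⟨i, le_refl _, hk, he⟩
    · exact ⟨k, by omega, hk, he⟩

lemma XFrom_none (l : List Char) (i : Nat) (h : l.length ≤ i + 2) : ¬ XFrom l i := by
  rintro ⟨k, hik, hk, _⟩; omega

lemma PFromA_succ (l : List Char) (i : Nat) :
    PFromA l i ↔ (∃ k, i + 2 ≤ k ∧ k + 1 < l.length ∧ pairAt l i = pairAt l k) ∨ PFromA l (i + 1) := by
  constructor
  · rintro ⟨a, b, hia, hab, hb, he⟩
    rcases Nat.eq_or_lt_of_le hia with rfl | h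
    · exact Or.inl ⟨b, hab, hb, he⟩
    · exact Or.inr ⟨a, b, h, hab, hb, he⟩
  · rintro (⟨b, hab, hb, he⟩ | ⟨a, b, hia, hab, hb, he⟩)
    · exact ⟨i, b, le_refl _, hab, hb, he⟩
    · exact ⟨a, b, by omega, hab, hb, he⟩

lemma PFromA_none (l : List Char) (i : Nat) (h : l.length ≤ i) : ¬ PFromA l i := by
  rintro ⟨a, b, hia, hab, hb, _⟩; omega

lemma PFromB_succ (l : List Char) (i : Nat) :
    PFromB l i ↔ (∃ a, a + 2 ≤ i ∧ i + 1 < l.length ∧ pairAt l a = pairAt l i) ∨ PFromB l (i + 1) := by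
  constructor
  · rintro ⟨a, b, hab, hib, hb, he⟩
    rcases Nat.eq_or_lt_of_le hib with rfl | h
    · exact Or.inl ⟨a, hab, hb, he⟩
    · exact Or.inr ⟨a, b, hab, h, hb, he⟩
  · rintro (⟨a, hab, hb, he⟩ | ⟨a, b, hab, hib, hb, he⟩)
    · exact ⟨a, i, hab, le_refl _, hb, he⟩
    · exact ⟨a, b, hab, by omega, hb, he⟩

lemma PFromB_none (l : List Char) (i : Nat) (h : l.length - 1 ≤ i) : ¬ PFromB l i := by
  rintro ⟨a, b, hab, hib, hb, _⟩; omega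

-- A's inner while scans j, j+1, …: it reports pr or a match of pair i at some k ≥ j
lemma aPairWhile_iff (l : List Char) (i : Nat) : ∀ m j pr, l.length - j ≤ m →
    (aPairWhile l i j pr = true ↔
      pr = true ∨ ∃ k, j ≤ k ∧ k + 1 < l.length ∧ pairAt l i = pairAt l k) := by
  intro m
  induction m with
  | zero =>
    intro j pr h
    rw [aPairWhile]
    have hj : ¬ (j + 1 < l.length) := by omega
    simp only [hj, if_false]
    constructor
    · exact Or.inl
    · rintro (hp | ⟨k, hk, hlen, _⟩)
      · exact hp
      · omega
  | succ m ih =>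
    intro j pr h
    rw [aPairWhile]
    by_cases hj : j + 1 < l.length
    · simp only [hj, if_true]
      rw [ih (j + 1) _ (by omega)]
      by_cases he : pairAt l i = pairAt l j
      · have he' : (l.getD i ' ', l.getD (i + 1) ' ') = (l.getD j ' ', l.getD (j + 1) ' ') := he
        simp only [he', if_true]
        constructor
        · intro _; exact Or.inr ⟨j, le_refl _, hj, he⟩
        · intro _; simp
      · have he' : (l.getD i ' ', l.getD (i + 1) ' ') ≠ (l.getD j ' ', l.getD (j + 1) ' ') := he
        simp only [he', if_false]
        constructor
        · rintro (hp | ⟨k, hk, h1, h2⟩)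
          · exact Or.inl hp
          · exact Or.inr ⟨k, by omega, h1, h2⟩
        · rintro (hp | ⟨k, hk, h1, h2⟩)
          · exact Or.inl hp
          · rcases Nat.eq_or_lt_of_le hk with rfl | hlt
            · exact absurd h2 he
            · exact Or.inr ⟨k, hlt, h1, h2⟩
    · simp only [hj, if_false]
      constructor
      · exact Or.inl
      · rintro (hp | ⟨k, hk, hlen, _⟩)
        · exact hp
        · omega

-- A's outer loop: accumulated flags plus everything discovered from index i on
set_option maxHeartbeats 1000000 in
lemma aLineLoop_iff (l : List Char) : ∀ m i xyx pr, l.length - i ≤ m →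
    (aLineLoop l i xyx pr = true ↔ (xyx = true ∨ XFrom l i) ∧ (pr = true ∨ PFromA l i)) := by
  intro m
  induction m with
  | zero =>
    intro i xyx pr h
    rw [aLineLoop]
    have hi : ¬ (i < l.length) := by omega
    simp only [hi, if_false, Bool.and_eq_true]
    have hX := XFrom_none l i (by omega)
    have hP := PFromA_none l i (by omega)
    tauto
  | succ m ih =>
    intro i xyx pr h
    rw [aLineLoop]
    by_cases hi : i < l.length
    · simp only [hi, if_true]
      set xyx' := if i + 2 < l.length ∧ xyx = false then
                    (if l.getD i ' ' = l.getD (i + 2) ' ' then true else xyx)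
                  else xyx with hxdef
      set pr' := if pr = false then aPairWhile l i (i + 2) pr else pr with hpdef
      have hx : xyx' = true ↔ xyx = true ∨ (i + 2 < l.length ∧ l.getD i ' ' = l.getD (i + 2) ' ') := by
        rw [hxdef]
        cases xyx <;>
          by_cases h1 : i + 2 < l.length <;>
            by_cases h2 : l.getD i ' ' = l.getD (i + 2) ' ' <;>
              simp [h1]
      have hp : pr' = true ↔ pr = true ∨ ∃ k, i + 2 ≤ k ∧ k + 1 < l.length ∧ pairAt l i = pairAt l k := by
        rw [hpdef]
        cases pr
        · simpa using aPairWhile_iff l i l.length (i + 2) false (by omega)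
        · simp
      have hxgoal : (xyx' = true ∨ XFrom l (i + 1)) ↔ (xyx = true ∨ XFrom l i) := by
        rw [hx, XFrom_succ l i]; exact or_assoc
      have hpgoal : (pr' = true ∨ PFromA l (i + 1)) ↔ (pr = true ∨ PFromA l i) := by
        rw [hp, PFromA_succ l i]; exact or_assoc
      by_cases hbr : (pr' && xyx') = true
      · rw [if_pos hbr]
        rw [Bool.and_eq_true] at hbr
        constructor
        · intro _
          exact ⟨hxgoal.mp (Or.inl hbr.2), hpgoal.mp (Or.inl hbr.1)⟩
        · intro _; rfl
      · rw [if_neg hbr]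
        rw [ih (i + 1) xyx' pr' (by omega), hxgoal, hpgoal]
    · have hX := XFrom_none l i (by omega)
      have hP := PFromA_none l i (by omega)
      simp only [hi, if_false, Bool.and_eq_true]
      tauto

-- the dict invariant of B's loop: `first` maps each pair to its first index of occurrence before i
def DictInv (l : List Char) (i : Nat) (first : PySem.Dict (Char × Char) Nat) : Prop :=
  ∀ p k, first.get? p = some k ↔
    (k + 1 < l.length ∧ k < i ∧ pairAt l k = p ∧ ∀ m, m < k → pairAt l m ≠ p)

lemma DictInv_empty (l : List Char) : DictInv l 0 PySem.Dict.empty := by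
  intro p k
  constructor
  · intro h; simp [PySem.Dict.empty, PySem.Dict.get?] at h
  · rintro ⟨-, hk, -, -⟩; omega

-- if the dict holds no entry for p, p has no occurrence before i (take the least one otherwise)
lemma no_occ_of_none (l : List Char) (i : Nat) (first : PySem.Dict (Char × Char) Nat)
    (hinv : DictInv l i first) (hi : i < l.length - 1) (p : Char × Char)
    (h : first.get? p = none) : ∀ m, m < i → pairAt l m ≠ p := by
  intro m hm he
  have hex : ∃ m, pairAt l m = p := ⟨m, he⟩
  have hfind := Nat.find_spec hex
  have hle : Nat.find hex ≤ m := Nat.find_min' hex he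
  have hs : first.get? p = some (Nat.find hex) := by
    rw [hinv]
    exact ⟨by omega, by omega, hfind, fun m' hm' he' => Nat.find_min hex hm' he'⟩
  rw [h] at hs
  simp at hs

set_option maxHeartbeats 1000000 in
lemma bLineLoop_iff (l : List Char) : ∀ m i first xyx pr, l.length - 1 - i ≤ m → DictInv l i first →
    (bLineLoop l i first xyx pr = true ↔ (xyx = true ∨ XFrom l i) ∧ (pr = true ∨ PFromB l i)) := by
  intro m
  induction m with
  | zero =>
    intro i first xyx pr h hinv
    rw [bLineLoop]
    have hi : ¬ (i < l.length - 1) := by omega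
    simp only [hi, if_false, Bool.and_eq_true]
    have hX := XFrom_none l i (by omega)
    have hP := PFromB_none l i (by omega)
    tauto
  | succ m ih =>
    intro i first xyx pr h hinv
    rw [bLineLoop]
    by_cases hi : i < l.length - 1
    · simp only [hi, if_true]
      have hxgoal :
          ((xyx || (decide (i + 2 < l.length) && (l.getD i ' ' == l.getD (i + 2) ' '))) = true
            ∨ XFrom l (i + 1)) ↔ (xyx = true ∨ XFrom l i) := by
        rw [XFrom_succ l i]
        simp only [Bool.or_eq_true, Bool.and_eq_true, decide_eq_true_eq, beq_iff_eq]
        tauto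
      cases hg : first.get? (l.getD i ' ', l.getD (i + 1) ' ') with
      | some k =>
        have hk := (hinv _ k).mp hg
        have hinv' : DictInv l (i + 1) first := by
          intro q n
          rw [hinv q n]
          constructor
          · rintro ⟨h1, h2, h3, h4⟩; exact ⟨h1, by omega, h3, h4⟩
          · rintro ⟨h1, h2, h3, h4⟩
            refine ⟨h1, ?_, h3, h4⟩
            rcases Nat.lt_succ_iff_lt_or_eq.mp h2 with h2' | rfl
            · exact h2'
            · exact absurd (hk.2.2.1.trans h3) (h4 k hk.2.1)
        have hpgoal : ((pr || decide (i - k ≥ 2)) = true ∨ PFromB l (i + 1)) ↔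
            (pr = true ∨ PFromB l i) := by
          rw [PFromB_succ l i]
          simp only [Bool.or_eq_true, decide_eq_true_eq]
          constructor
          · rintro ((hp | hge) | hP)
            · exact Or.inl hp
            · exact Or.inr (Or.inl ⟨k, by omega, by omega, hk.2.2.1⟩)
            · exact Or.inr (Or.inr hP)
          · rintro (hp | (⟨a, hai, hlen, he⟩ | hP))
            · exact Or.inl (Or.inl hp)
            · refine Or.inl (Or.inr ?_)
              have hka : k ≤ a := by
                by_contra hlt
                exact hk.2.2.2 a (by omega) he
              omega
            · exact Or.inr hP
        rw [ih (i + 1) first _ _ (by omega) hinv', hxgoal, hpgoal]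
      | none =>
        have hnone := no_occ_of_none l i first hinv hi _ hg
        have hinv' : DictInv l (i + 1)
            (first.insert (l.getD i ' ', l.getD (i + 1) ' ') i) := by
          intro q n
          by_cases hq : q = (l.getD i ' ', l.getD (i + 1) ' ')
          · subst hq
            rw [PySem.Dict.get?_insert_self]
            constructor
            · intro hsome
              have hn : n = i := by injection hsome with h'; omega
              subst hn
              exact ⟨by omega, by omega, rfl, hnone⟩
            · rintro ⟨h1, h2, h3, h4⟩
              have hn : n = i := by
                rcases Nat.lt_succ_iff_lt_or_eq.mp h2 with h2' | rfl
                · exact absurd h3 (hnone n h2')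
                · rfl
              rw [hn]
          · rw [PySem.Dict.get?_insert_of_ne first i hq, hinv q n]
            constructor
            · rintro ⟨h1, h2, h3, h4⟩; exact ⟨h1, by omega, h3, h4⟩
            · rintro ⟨h1, h2, h3, h4⟩
              refine ⟨h1, ?_, h3, h4⟩
              rcases Nat.lt_succ_iff_lt_or_eq.mp h2 with h2' | rfl
              · exact h2'
              · exact absurd h3.symm hq
        have hpgoal : (pr = true ∨ PFromB l (i + 1)) ↔ (pr = true ∨ PFromB l i) := by
          rw [PFromB_succ l i]
          constructor
          · rintro (hp | hP)
            · exact Or.inl hp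
            · exact Or.inr (Or.inr hP)
          · rintro (hp | (⟨a, hai, hlen, he⟩ | hP))
            · exact Or.inl hp
            · exact absurd he (hnone a (by omega))
            · exact Or.inr hP
        rw [ih (i + 1) _ _ _ (by omega) hinv', hxgoal, hpgoal]
    · have hX := XFrom_none l i (by omega)
      have hP := PFromB_none l i (by omega)
      simp only [hi, if_false, Bool.and_eq_true]
      tauto

lemma line_eq (l : List Char) :
    aLineLoop l 0 false false = bLineLoop l 0 PySem.Dict.empty false false := by
  rw [Bool.eq_iff_iff,
      aLineLoop_iff l l.length 0 false false (by omega),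
      bLineLoop_iff l (l.length - 1) 0 PySem.Dict.empty false false (by omega) (DictInv_empty l)]
  have hAB : PFromA l 0 ↔ PFromB l 0 := by
    constructor
    · rintro ⟨a, b, -, hab, hb, he⟩; exact ⟨a, b, hab, Nat.zero_le _, hb, he⟩
    · rintro ⟨a, b, hab, -, hb, he⟩; exact ⟨a, b, Nat.zero_le _, hab, hb, he⟩
  rw [hAB]

-- ===== VERDICT (by name: the statement is the Claim_ definition above) =====
theorem part_two_spec : Claim_equal_part_two := by
  intro input _
  unfold Spec_part_two part_two part_two_alt
  have hfun : (fun (acc : Int) (line : String) => if aLineLoop line.toList 0 false false then acc + 1 else acc)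
      = (fun (acc : Int) (line : String) => if bLineLoop line.toList 0 PySem.Dict.empty false false then acc + 1 else acc) := by
    funext acc line
    rw [line_eq]
  rw [hfun]
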